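-- pv_equiv track=rewrite | github.com/jinurumi/Algorithm | 프로그래머스/0/181890. 왼쪽 오른쪽/왼쪽 오른쪽.py | solution
-- ===== SOURCE A (Python) =====
-- def solution(str_list):
--     answer = []
--     for i, d in enumerate(str_list):
--         if d == "l":
--             return str_list[:i]
--         elif d =="r":
--             return str_list[i+1:]
--         else:
--             pass
--     return []
-- ===== SOURCE B (Python) =====
-- def solution(str_list):
--     try:
--         li = str_list.index("l")
--     except ValueError:
--         li = None
--     try:
--         ri = str_list.index("r")
--     except ValueError:
--         ri = None
--     if li is None and ri is None:
--         return []
--     if ri is None or (li is not None and li < ri):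
--         return str_list[:li]
--     return str_list[ri + 1:]
-- ===== Notes on version B (the rewrite author's own statement) =====
-- stated objective: alternative
-- what changed: Replaces the single fused early-returning scan with two independent index searches (list.index for 'l' and for 'r') followed by a position comparison that picks the prefix or suffix slice.
import Mathlib
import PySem

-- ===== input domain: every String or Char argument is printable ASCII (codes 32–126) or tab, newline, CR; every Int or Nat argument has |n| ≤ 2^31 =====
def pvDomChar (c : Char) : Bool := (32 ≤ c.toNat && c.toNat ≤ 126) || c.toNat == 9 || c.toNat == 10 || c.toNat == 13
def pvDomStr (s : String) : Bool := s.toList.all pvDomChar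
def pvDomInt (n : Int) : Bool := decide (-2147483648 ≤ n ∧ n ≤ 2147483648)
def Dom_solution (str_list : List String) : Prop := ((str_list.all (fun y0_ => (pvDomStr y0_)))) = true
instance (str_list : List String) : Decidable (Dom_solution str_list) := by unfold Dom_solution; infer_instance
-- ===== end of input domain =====

-- B locates the 'l' and 'r' markers by two independent index searches and compares
-- positions, instead of A's single fused early-returning scan; same cost, different decomposition.
-- ===== PORT A =====
-- the enumerate loop, carried as an index counter; str_list[:i] / str_list[i+1:]
-- with the nonnegative loop index are exactly take i / drop (i+1)
def solutionGo (orig : List String) (i : Nat) : List String → List String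
  | [] => []
  | d :: rest =>
      if d = "l" then orig.take i
      else if d = "r" then orig.drop (i + 1)
      else solutionGo orig (i + 1) rest

def solution (str_list : List String) : List String :=
  solutionGo str_list 0 str_list

-- ===== PORT B =====
-- list.index wrapped in try/except → PySem.List.index? (none = ValueError)
def solution_alt (str_list : List String) : List String :=
  let li := PySem.List.index? str_list "l"
  let ri := PySem.List.index? str_list "r"
  match li, ri with
  | none, none => []
  | some li, none => str_list.take li
  | none, some ri => str_list.drop (ri + 1)
  | some li, some ri =>
      if li < ri then str_list.take li else str_list.drop (ri + 1)

-- ===== PRECONDITION & SPEC =====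
def Spec_solution (str_list : List String) (out : List String) : Prop := out = solution_alt str_list
instance (str_list : List String) (out : List String) : Decidable (Spec_solution str_list out) := by unfold Spec_solution; infer_instance

-- ===== CLAIM (what is proved, stated in full; the proofs are below) =====
def Claim_equal_solution : Prop := ∀ (str_list : List String), Dom_solution str_list → Spec_solution str_list (solution str_list)

-- ===== LEMMAS AND PROOFS =====
theorem solutionGo_eq (orig : List String) :
    ∀ (xs : List String) (i : Nat),
    solutionGo orig i xs =
      match PySem.List.index? xs "l", PySem.List.index? xs "r" with
      | none, none => []
      | some li, none => orig.take (i + li)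
      | none, some ri => orig.drop (i + ri + 1)
      | some li, some ri =>
          if li < ri then orig.take (i + li) else orig.drop (i + ri + 1) := by
  intro xs
  induction xs with
  | nil => intro i; simp [solutionGo, PySem.List.index?]
  | cons d rest ih =>
      intro i
      by_cases hl : d = "l"
      · subst hl
        rw [solutionGo]
        rw [PySem.List.index?_cons_self,
            PySem.List.index?_cons_of_ne _ (by decide : ("l":String) ≠ "r")]
        cases PySem.List.index? rest "r" with
        | none => simp
        | some r => simp
      · by_cases hr : d = "r"
        · subst hr
          rw [solutionGo]
          rw [PySem.List.index?_cons_self,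
              PySem.List.index?_cons_of_ne _ (by decide : ("r":String) ≠ "l")]
          cases PySem.List.index? rest "l" with
          | none => simp [hl]
          | some l => simp [hl]
        · rw [solutionGo]
          rw [PySem.List.index?_cons_of_ne _ hl,
              PySem.List.index?_cons_of_ne _ hr]
          rw [if_neg hl, if_neg hr, ih (i + 1)]
          cases PySem.List.index? rest "l" with
          | none =>
              cases PySem.List.index? rest "r" with
              | none => simp
              | some r => simp; ring_nf
          | some l =>
              cases PySem.List.index? rest "r" with
              | none => simp; ring_nf
              | some r =>
                  simp only [Option.map_some]
                  have : (l + 1 < r + 1) = (l < r) := by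
                    simp [Nat.add_lt_add_iff_right]
                  split_ifs with h1 h2 h2 <;> first
                    | (simp; ring_nf) | omega

-- ===== VERDICT (by name: the statement is the Claim_ definition above) =====
theorem solution_spec : Claim_equal_solution := by
  intro str_list _
  unfold Spec_solution solution solution_alt
  rw [solutionGo_eq]
  cases PySem.List.index? str_list "l" <;>
    cases PySem.List.index? str_list "r" <;>
      simp
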